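-- pv_equiv track=rewrite | github.com/ElenaRevicheva/VibeJobHunterAIPA_AIMCF | src/notifications/performance_tracker.py | _calculate_business_value
-- ===== SOURCE A (Python) =====
-- from typing import Dict, Any, List, Optional
--
-- def _calculate_business_value(opportunities: List) -> Dict[str, Any]:
--     """
--     Calculate estimated business value
--
--     Rough estimates:
--     - Investor contact: $50K (potential investment)
--     - Job interview: $150K (potential salary)
--     - Collaboration: $20K (potential revenue)
--     """
--     value = {
--         "investor_value": len([o for o in opportunities if o["type"] == "investor_contact"]) * 50000,
--         "job_value": len([o for o in opportunities if o["type"] == "job_interview"]) * 150000,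
--         "collaboration_value": len([o for o in opportunities if o["type"] == "collaboration"]) * 20000,
--     }
--
--     value["total_estimated_value"] = sum(value.values())
--
--     return value
-- ===== SOURCE B (Python) =====
-- def _calculate_business_value(opportunities):
--     """Single tally pass over opportunities, then assemble the value dict."""
--     inv = job = col = 0
--     for o in opportunities:
--         t = o["type"]
--         if t == "investor_contact":
--             inv += 1
--         elif t == "job_interview":
--             job += 1
--         elif t == "collaboration":
--             col += 1
--     iv, jv, cv = inv * 50000, job * 150000, col * 20000
--     return {
--         "investor_value": iv,
--         "job_value": jv,
--         "collaboration_value": cv,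
--         "total_estimated_value": iv + jv + cv,
--     }
-- ===== Notes on version B (the rewrite author's own statement) =====
-- stated objective: alternative
-- what changed: Replaces A's three separate filter passes over opportunities (one per opportunity type) with a single loop that tallies the three type counters and then assembles the dict from the counts.
import Mathlib
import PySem

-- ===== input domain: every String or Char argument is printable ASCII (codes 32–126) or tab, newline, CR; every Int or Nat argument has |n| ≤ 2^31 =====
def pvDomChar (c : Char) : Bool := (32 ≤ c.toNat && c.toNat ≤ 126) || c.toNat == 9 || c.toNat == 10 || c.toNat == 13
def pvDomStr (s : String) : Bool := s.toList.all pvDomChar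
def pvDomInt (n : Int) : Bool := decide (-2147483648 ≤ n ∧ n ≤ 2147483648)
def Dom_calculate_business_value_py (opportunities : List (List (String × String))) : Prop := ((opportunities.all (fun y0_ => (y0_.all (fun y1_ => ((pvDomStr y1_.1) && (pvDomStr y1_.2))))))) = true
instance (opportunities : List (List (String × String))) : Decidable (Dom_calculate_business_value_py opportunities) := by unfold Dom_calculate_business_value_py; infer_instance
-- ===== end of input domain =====

-- B replaces A's three filter passes with one tally loop over the list (alternative decomposition, same results).


-- o["type"]: first-match association-list lookup (dict indexing; none = KeyError, excluded by Pre_)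
def pvTypeOf (o : List (String × String)) : Option String :=
  (o.find? (fun p => p.1 == "type")).map (·.2)

-- ===== PORT A =====
def calculate_business_value_py (opportunities : List (List (String × String))) : List (String × Int) :=
  let iv : Int := ((opportunities.filter (fun o => pvTypeOf o == some "investor_contact")).length : Int) * 50000
  let jv : Int := ((opportunities.filter (fun o => pvTypeOf o == some "job_interview")).length : Int) * 150000
  let cv : Int := ((opportunities.filter (fun o => pvTypeOf o == some "collaboration")).length : Int) * 20000
  [("investor_value", iv), ("job_value", jv), ("collaboration_value", cv),
   ("total_estimated_value", iv + jv + cv)]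

-- ===== PORT B =====
def pvTally : List (List (String × String)) → Int × Int × Int → Int × Int × Int
  | [], acc => acc
  | o :: rest, (i, j, c) =>
    match pvTypeOf o with
    | some t =>
      if t == "investor_contact" then pvTally rest (i + 1, j, c)
      else if t == "job_interview" then pvTally rest (i, j + 1, c)
      else if t == "collaboration" then pvTally rest (i, j, c + 1)
      else pvTally rest (i, j, c)
    | none => pvTally rest (i, j, c)  -- Python B raises KeyError here; outside Pre_

def calculate_business_value_py_alt (opportunities : List (List (String × String))) : List (String × Int) :=
  let t := pvTally opportunities (0, 0, 0)
  let iv := t.1 * 50000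
  let jv := t.2.1 * 150000
  let cv := t.2.2 * 20000
  [("investor_value", iv), ("job_value", jv), ("collaboration_value", cv),
   ("total_estimated_value", iv + jv + cv)]

-- ===== PRECONDITION & SPEC =====
-- Pre_ excludes elements without a "type" key, on which both A and B raise KeyError.
def Pre_calculate_business_value_py (opportunities : List (List (String × String))) : Prop :=
  (opportunities.all (fun o => o.any (fun p => p.1 == "type"))) = true
instance (opportunities : List (List (String × String))) : Decidable (Pre_calculate_business_value_py opportunities) := by unfold Pre_calculate_business_value_py; infer_instance

def pvWitness_calculate_business_value_py : (List (List (String × String))) :=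
  [[("type", "investor_contact")], [("type", "other"), ("x", "y")]]

def Spec_calculate_business_value_py (opportunities : List (List (String × String))) (out : List (String × Int)) : Prop := out = calculate_business_value_py_alt opportunities
instance (opportunities : List (List (String × String))) (out : List (String × Int)) : Decidable (Spec_calculate_business_value_py opportunities out) := by unfold Spec_calculate_business_value_py; infer_instance

-- ===== CLAIM (what is proved, stated in full; the proofs are below) =====
def Claim_equal_calculate_business_value_py : Prop := ∀ (opportunities : List (List (String × String))), Dom_calculate_business_value_py opportunities → Pre_calculate_business_value_py opportunities → Spec_calculate_business_value_py opportunities (calculate_business_value_py opportunities)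

-- ===== LEMMAS AND PROOFS =====
theorem pvTally_eq (l : List (List (String × String))) (i j c : Int) :
    pvTally l (i, j, c) =
      (i + ((l.filter (fun o => pvTypeOf o == some "investor_contact")).length : Int),
       j + ((l.filter (fun o => pvTypeOf o == some "job_interview")).length : Int),
       c + ((l.filter (fun o => pvTypeOf o == some "collaboration")).length : Int)) := by
  induction l generalizing i j c with
  | nil => simp [pvTally]
  | cons o rest ih =>
    simp only [pvTally]
    cases h : pvTypeOf o with
    | none => simp [h, ih]
    | some t =>
      by_cases h1 : t = "investor_contact"
      · subst h1; simp [h, ih]; omega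
      · by_cases h2 : t = "job_interview"
        · subst h2; simp [h, ih]; omega
        · by_cases h3 : t = "collaboration"
          · subst h3; simp [h, ih]; omega
          · simp [h, ih, h1, h2, h3]

-- ===== VERDICT (by name: the statement is the Claim_ definition above) =====
theorem calculate_business_value_py_spec : Claim_equal_calculate_business_value_py := by
  intro opportunities _ _
  unfold Spec_calculate_business_value_py calculate_business_value_py calculate_business_value_py_alt
  simp [pvTally_eq]
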